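-- pv_equiv track=rewrite | github.com/Adele-hhhh/Picross | NOMBRES.py | nombre_colonne
-- ===== SOURCE A (Python) =====
-- def nombre_colonne(liste_solution) :
--     liste = []
--     for i in range (len(liste_solution)):
--         l = []
--         k = 0
--         for j in range (len(liste_solution)) :
--             if liste_solution[j][i] == 1 :
--                 k += 1
--             elif k > 0:
--                 l.append(k)
--                 k = 0
--         if k > 0 :
--             l.append(k)
--         liste.append(l)
--     return liste
-- ===== SOURCE B (Python) =====
-- def nombre_colonne(liste_solution):
--     n = len(liste_solution)
--
--     def runs_col(i):
--         # stage 1: run-length-encode the whole column into (value, count) groups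
--         groups = []
--         for x in [liste_solution[j][i] for j in range(n)]:
--             if groups and groups[-1][0] == x:
--                 groups[-1][1] += 1
--             else:
--                 groups.append([x, 1])
--         # stage 2: keep only the groups of 1s, project to their lengths
--         return [c for v, c in groups if v == 1]
--
--     return [runs_col(i) for i in range(n)]
-- ===== Notes on version B (the rewrite author's own statement) =====
-- stated objective: alternative
-- what changed: B run-length-encodes each whole column into (value,count) groups (a generic groupby pass that tracks every value, mutating the last group) and then filters/projects the groups of 1s in a second stage, instead of A's single-purpose counter of 1s flushed on non-1 cells.
import Mathlib
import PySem

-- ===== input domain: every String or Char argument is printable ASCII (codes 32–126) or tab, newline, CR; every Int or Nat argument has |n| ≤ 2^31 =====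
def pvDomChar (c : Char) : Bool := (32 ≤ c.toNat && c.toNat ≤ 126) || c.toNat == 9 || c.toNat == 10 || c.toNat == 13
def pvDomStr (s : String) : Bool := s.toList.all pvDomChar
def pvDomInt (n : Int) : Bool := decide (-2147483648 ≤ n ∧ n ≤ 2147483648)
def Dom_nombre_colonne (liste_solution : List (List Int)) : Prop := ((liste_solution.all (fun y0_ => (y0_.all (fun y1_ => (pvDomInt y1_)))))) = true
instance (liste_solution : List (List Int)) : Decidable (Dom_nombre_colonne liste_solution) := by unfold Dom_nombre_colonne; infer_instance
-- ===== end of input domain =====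

-- B run-length-encodes each whole column into (value,count) groups and filters the groups of 1s
-- in a second stage, instead of A's counter of 1s flushed on non-1 cells; alternative decomposition, same cost.

-- ===== PORT A =====
-- cell access liste_solution[j][i]; total here, Pre_ guarantees the indices are in range
def pvCell (ls : List (List Int)) (j i : Nat) : Int := ((ls[j]?.getD [])[i]?.getD 0)

def nombre_colonne (liste_solution : List (List Int)) : List (List Int) :=
  (List.range liste_solution.length).foldl (fun liste i =>
    let p := (List.range liste_solution.length).foldl (fun (p : List Int × Int) j =>
      if pvCell liste_solution j i = 1 then (p.1, p.2 + 1)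
      else if p.2 > 0 then (p.1 ++ [p.2], 0)
      else p) ([], 0)
    liste ++ [if p.2 > 0 then p.1 ++ [p.2] else p.1]) []

-- ===== PORT B =====
-- one step of Source B's grouping loop: increment the last (value,count) group or open a new one
def pvGroupStep (gs : List (Int × Int)) (x : Int) : List (Int × Int) :=
  match gs.getLast? with
  | some (v, c) => if v = x then gs.dropLast ++ [(v, c + 1)] else gs ++ [(x, 1)]
  | none => [(x, 1)]

-- Source B's runs_col: group the column, then keep lengths of the groups of 1s
def pvRunsCol (col : List Int) : List Int :=
  ((col.foldl pvGroupStep []).filter (fun p => p.1 == 1)).map (fun p => p.2)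

def nombre_colonne_alt (liste_solution : List (List Int)) : List (List Int) :=
  (List.range liste_solution.length).map (fun i =>
    pvRunsCol ((List.range liste_solution.length).map (fun j => pvCell liste_solution j i)))

-- ===== PRECONDITION & SPEC =====
-- Pre_ excludes exactly the inputs where A (and B alike) raises IndexError: some row
-- shorter than the number of rows (A indexes liste_solution[j][i] for all i,j < len(liste_solution)).
def Pre_nombre_colonne (liste_solution : List (List Int)) : Prop :=
  ∀ row ∈ liste_solution, liste_solution.length ≤ row.length
instance (liste_solution : List (List Int)) : Decidable (Pre_nombre_colonne liste_solution) := by unfold Pre_nombre_colonne; infer_instance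

def pvWitness_nombre_colonne : List (List Int) := [[1, 0], [1, 1]]

def Spec_nombre_colonne (liste_solution : List (List Int)) (out : List (List Int)) : Prop := out = nombre_colonne_alt liste_solution
instance (liste_solution : List (List Int)) (out : List (List Int)) : Decidable (Spec_nombre_colonne liste_solution out) := by unfold Spec_nombre_colonne; infer_instance

-- ===== CLAIM (what is proved, stated in full; the proofs are below) =====
def Claim_equal_nombre_colonne : Prop := ∀ (liste_solution : List (List Int)), Dom_nombre_colonne liste_solution → Pre_nombre_colonne liste_solution → Spec_nombre_colonne liste_solution (nombre_colonne liste_solution)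

-- ===== LEMMAS AND PROOFS =====

-- A's inner counter step and end-of-loop flush, abstracted over the column list
def pvStep (p : List Int × Int) (x : Int) : List Int × Int :=
  if x = 1 then (p.1, p.2 + 1)
  else if p.2 > 0 then (p.1 ++ [p.2], 0)
  else p

def pvFlush (p : List Int × Int) : List Int :=
  if p.2 > 0 then p.1 ++ [p.2] else p.1

-- intermediate semantics: runs of 1s with a pending count k
def pvG (k : Int) : List Int → List Int
  | [] => if k > 0 then [k] else []
  | x :: xs => if x = 1 then pvG (k + 1) xs else if k > 0 then k :: pvG 0 xs else pvG 0 xs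

theorem pvFoldG (col : List Int) : ∀ (l : List Int) (k : Int), 0 ≤ k →
    pvFlush (col.foldl pvStep (l, k)) = l ++ pvG k col := by
  induction col with
  | nil =>
    intro l k hk
    simp only [List.foldl_nil, pvFlush, pvG]
    split_ifs <;> simp
  | cons x xs ih =>
    intro l k hk
    simp only [List.foldl_cons, pvStep, pvG]
    split_ifs with h1 h2
    · exact ih l (k + 1) (by omega)
    · rw [ih (l ++ [k]) 0 le_rfl]; simp
    · have hk0 : k = 0 := by omega
      rw [ih l k hk, hk0]

-- grouping with a pending open group (v, c): the closed form of Source B's grouping loop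
def pvGroups' (v c : Int) : List Int → List (Int × Int)
  | [] => [(v, c)]
  | x :: xs => if x = v then pvGroups' v (c + 1) xs else (v, c) :: pvGroups' x 1 xs

theorem foldl_groupStep (col : List Int) : ∀ (pre : List (Int × Int)) (v c : Int),
    col.foldl pvGroupStep (pre ++ [(v, c)]) = pre ++ pvGroups' v c col := by
  induction col with
  | nil => intro pre v c; simp [pvGroups']
  | cons x xs ih =>
    intro pre v c
    simp only [List.foldl_cons, pvGroups']
    have hstep : pvGroupStep (pre ++ [(v, c)]) x =
        if x = v then pre ++ [(v, c + 1)] else (pre ++ [(v, c)]) ++ [(x, 1)] := by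
      simp only [pvGroupStep, List.getLast?_concat, List.dropLast_concat]
      split_ifs with h1 h2 h2 <;> simp_all
    rw [hstep]
    split_ifs with h
    · exact ih pre v (c + 1)
    · rw [ih (pre ++ [(v, c)]) x 1]; simp

-- filtering the groups of 1s out of pvGroups' computes pvG
theorem filter_groups' (xs : List Int) : ∀ (v c : Int), 0 < c →
    ((pvGroups' v c xs).filter (fun p => p.1 == 1)).map (fun p => p.2)
      = pvG (if v = 1 then c else 0) xs := by
  induction xs with
  | nil =>
    intro v c hc
    by_cases hv : v = 1 <;> simp [pvGroups', pvG, hv, hc]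
  | cons x xs ih =>
    intro v c hc
    simp only [pvGroups']
    by_cases hx : x = v
    · rw [if_pos hx, ih v (c + 1) (by omega)]
      subst hx
      by_cases hv : x = 1
      · simp [pvG, hv]
      · simp [pvG, hv]
    · rw [if_neg hx]
      by_cases hv : v = 1
      · have hx1 : ¬ x = 1 := by rw [hv] at hx; exact hx
        simp only [List.filter_cons]
        rw [if_pos (by simp [hv]), List.map_cons, ih x 1 one_pos]
        simp [pvG, hx1, hv, hc]
      · simp only [List.filter_cons]
        rw [if_neg (by simp [hv]), ih x 1 one_pos]
        by_cases hx1 : x = 1 <;> simp [pvG, hx1, hv]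

theorem runsCol_eq_pvG (col : List Int) : pvRunsCol col = pvG 0 col := by
  cases col with
  | nil => simp [pvRunsCol, pvG]
  | cons x xs =>
    have h0 : pvGroupStep [] x = [] ++ [(x, 1)] := by simp [pvGroupStep]
    unfold pvRunsCol
    rw [List.foldl_cons, h0, foldl_groupStep xs [] x 1, List.nil_append,
      filter_groups' xs x 1 one_pos]
    by_cases hx : x = 1 <;> simp [pvG, hx]

theorem pvFoldl_snoc {α β : Type} (h : List β → α → List β) (g : α → β)
    (hh : ∀ l a, h l a = l ++ [g a]) (xs : List α) : ∀ (acc : List β),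
    xs.foldl h acc = acc ++ xs.map g := by
  induction xs with
  | nil => simp
  | cons x xs ih => intro acc; simp [hh, ih]

-- ===== VERDICT (by name: the statement is the Claim_ definition above) =====
theorem nombre_colonne_spec : Claim_equal_nombre_colonne := by
  intro ls _ _
  unfold Spec_nombre_colonne nombre_colonne nombre_colonne_alt
  refine pvFoldl_snoc _ (fun i => pvRunsCol ((List.range ls.length).map (fun j => pvCell ls j i))) ?_ _ []
  intro l i
  show l ++ [pvFlush ((List.range ls.length).foldl
      (fun p j => pvStep p (pvCell ls j i)) ([], 0))] = _
  rw [show (List.range ls.length).foldl (fun p j => pvStep p (pvCell ls j i)) ([], 0)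
      = ((List.range ls.length).map (fun j => pvCell ls j i)).foldl pvStep ([], 0)
      from List.foldl_map.symm]
  rw [pvFoldG _ [] 0 le_rfl]
  simp [runsCol_eq_pvG]
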